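-- pv_equiv track=rewrite | github.com/nv-morpheus/morpheus-experimental | syslog-resemblance-grouping/srg/_srg.py | _rep_agg
-- ===== SOURCE A (Python) =====
-- def _rep_agg(chunks):
--     candidates = dict()
--     for chunk in chunks:
--         for group, chunk_candidate in chunk.items():
--             if group not in candidates:
--                 candidates[group] = chunk_candidate
--             else:
--                 current_frontrunner = candidates[group]
--                 if current_frontrunner[1] > chunk_candidate[1]:
--                     candidates[group] = chunk_candidate
--     return candidates
-- ===== SOURCE B (Python) =====
-- def _rep_agg(chunks):
--     # Group-then-reduce: collect every chunk candidate per group into a table,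
--     # then pick the first minimum-score candidate of each group.
--     table = {}
--     for chunk in chunks:
--         for group, cand in chunk.items():
--             table.setdefault(group, []).append(cand)
--     return {group: min(cands, key=lambda c: c[1]) for group, cands in table.items()}
-- ===== Notes on version B (the rewrite author's own statement) =====
-- stated objective: alternative
-- what changed: Replaces A's single-pass running-min dict update with a two-phase group-then-reduce: first collect every chunk candidate per group into a table, then pick each group's first minimum-score candidate with min(key=c[1]).
import Mathlib
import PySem

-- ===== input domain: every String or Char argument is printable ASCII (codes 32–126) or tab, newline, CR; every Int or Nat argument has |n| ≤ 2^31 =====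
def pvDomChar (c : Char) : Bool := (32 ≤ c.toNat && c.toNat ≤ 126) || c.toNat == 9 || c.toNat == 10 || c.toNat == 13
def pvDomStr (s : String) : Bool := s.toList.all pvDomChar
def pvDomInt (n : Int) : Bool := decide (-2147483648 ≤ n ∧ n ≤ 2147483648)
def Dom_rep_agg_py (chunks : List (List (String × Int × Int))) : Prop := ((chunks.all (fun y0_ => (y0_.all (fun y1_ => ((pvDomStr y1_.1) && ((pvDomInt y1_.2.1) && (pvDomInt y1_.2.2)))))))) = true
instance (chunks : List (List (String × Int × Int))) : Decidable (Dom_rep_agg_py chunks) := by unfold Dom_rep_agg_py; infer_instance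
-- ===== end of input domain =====

-- B changes the decomposition: instead of A's running-min dict, it builds a per-group
-- candidate table and reduces each group with first-minimum; same O(n) cost (objective: alternative).

-- ===== PORT A =====
def rep_agg_py (chunks : List (List (String × Int × Int))) : List (String × Int × Int) :=
  (chunks.foldl (fun candidates chunk =>
    chunk.foldl (fun (cand : PySem.Dict String (Int × Int)) item =>
      if cand.contains item.1 = false then
        cand.insert item.1 item.2
      else
        match cand.get? item.1 with
        | none => cand  -- unreachable: 'group in candidates' was just checked (KeyError cannot occur)
        | some current_frontrunner =>
          if current_frontrunner.2 > item.2.2 then cand.insert item.1 item.2 else cand)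
      candidates)
    PySem.Dict.empty).items

-- ===== PORT B =====
-- min(cands, key=lambda c: c[1]): first minimal element (Python min keeps the current on ties)
def pyMinBySnd (cands : List (Int × Int)) : Int × Int :=
  match cands with
  | [] => (0, 0)  -- Python's min raises on []; unreachable here (table values are nonempty)
  | c :: rest => rest.foldl (fun best x => if x.2 < best.2 then x else best) c

def rep_agg_py_alt (chunks : List (List (String × Int × Int))) : List (String × Int × Int) :=
  let table : PySem.Dict String (List (Int × Int)) :=
    chunks.foldl (fun t chunk =>
      chunk.foldl (fun t item => t.modify item.1 [] (· ++ [item.2])) t)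
      PySem.Dict.empty
  table.items.map (fun p => (p.1, pyMinBySnd p.2))

-- ===== PRECONDITION & SPEC =====
def Spec_rep_agg_py (chunks : List (List (String × Int × Int))) (out : List (String × Int × Int)) : Prop := out = rep_agg_py_alt chunks
instance (chunks : List (List (String × Int × Int))) (out : List (String × Int × Int)) : Decidable (Spec_rep_agg_py chunks out) := by unfold Spec_rep_agg_py; infer_instance

-- ===== CLAIM (what is proved, stated in full; the proofs are below) =====
def Claim_equal_rep_agg_py : Prop := ∀ (chunks : List (List (String × Int × Int))), Dom_rep_agg_py chunks → Spec_rep_agg_py chunks (rep_agg_py chunks)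

-- ===== LEMMAS AND PROOFS =====

-- the two step functions of the folds above
def stepA (c : PySem.Dict String (Int × Int)) (item : String × Int × Int) : PySem.Dict String (Int × Int) :=
  if c.contains item.1 = false then
    c.insert item.1 item.2
  else
    match c.get? item.1 with
    | none => c
    | some cur => if cur.2 > item.2.2 then c.insert item.1 item.2 else c

def stepB (t : PySem.Dict String (List (Int × Int))) (item : String × Int × Int) : PySem.Dict String (List (Int × Int)) :=
  t.modify item.1 [] (· ++ [item.2])

def pvInv (c : PySem.Dict String (Int × Int)) (t : PySem.Dict String (List (Int × Int))) : Prop :=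
  t.keys.Nodup ∧ (∀ p ∈ t.items, p.2 ≠ []) ∧
    c.items = t.items.map (fun p => (p.1, pyMinBySnd p.2))

theorem pyMinBySnd_append (cs : List (Int × Int)) (v : Int × Int) (h : cs ≠ []) :
    pyMinBySnd (cs ++ [v]) = if v.2 < (pyMinBySnd cs).2 then v else pyMinBySnd cs := by
  match cs with
  | [] => exact absurd rfl h
  | c :: rest => simp [pyMinBySnd, List.foldl_append]

theorem keys_eq_of_inv (c : PySem.Dict String (Int × Int)) (t : PySem.Dict String (List (Int × Int)))
    (h : pvInv c t) : c.keys = t.keys := by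
  obtain ⟨-, -, hit⟩ := h
  show c.items.map (·.1) = t.items.map (·.1)
  rw [hit, List.map_map]
  rfl

theorem inv_step (c : PySem.Dict String (Int × Int)) (t : PySem.Dict String (List (Int × Int)))
    (h : pvInv c t) (item : String × Int × Int) :
    pvInv (stepA c item) (stepB t item) := by
  obtain ⟨hnd, hne, hit⟩ := h
  have hkeys : c.keys = t.keys := keys_eq_of_inv c t ⟨hnd, hne, hit⟩
  have hcont : c.contains item.1 = t.contains item.1 := by
    rw [PySem.Dict.contains_eq_decide_mem_keys, PySem.Dict.contains_eq_decide_mem_keys, hkeys]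
  have hmod : stepB t item = t.insert item.1 (t.getD item.1 [] ++ [item.2]) := rfl
  by_cases ht : t.contains item.1 = true
  case neg =>
    -- fresh group: both sides append
    have ht' : t.contains item.1 = false := by simpa using ht
    have hc' : c.contains item.1 = false := by rw [hcont]; exact ht'
    have hgetD : t.getD item.1 [] = [] := PySem.Dict.getD_of_not_contains t [] ht'
    have hAstep : stepA c item = c.insert item.1 item.2 := by simp [stepA, hc']
    refine ⟨?_, ?_, ?_⟩
    · rw [hmod, PySem.Dict.keys_insert_of_not_contains t _ ht']
      have : item.1 ∉ t.keys := by
        have := PySem.Dict.contains_eq_decide_mem_keys t item.1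
        rw [ht'] at this
        simpa using this.symm
      refine List.nodup_append.mpr ⟨hnd, List.nodup_singleton _, ?_⟩
      intro a ha b hb
      rw [List.mem_singleton] at hb
      intro hab
      exact this ((hab.trans hb) ▸ ha)
    · intro p hp
      rw [hmod, PySem.Dict.items_insert_of_not_contains t _ ht'] at hp
      rcases List.mem_append.mp hp with hp | hp
      · exact hne p hp
      · simp at hp; subst hp; simp [hgetD]
    · rw [hAstep, hmod, PySem.Dict.items_insert_of_not_contains c _ hc',
        PySem.Dict.items_insert_of_not_contains t _ ht', List.map_append, hit, hgetD]
      simp [pyMinBySnd]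
  case pos =>
    -- existing group
    obtain ⟨cs, hcs⟩ : ∃ cs, t.get? item.1 = some cs := by
      have := PySem.Dict.contains_eq_isSome_get? t item.1
      rw [ht] at this
      exact Option.isSome_iff_exists.mp this.symm
    have hmemT : (item.1, cs) ∈ t.items := (PySem.Dict.get?_eq_some_iff_mem_items t _ _ hnd).mp hcs
    have hcsne : cs ≠ [] := hne _ hmemT
    have hgetD : t.getD item.1 [] = cs := PySem.Dict.getD_of_mem_items t hmemT hnd []
    have hndC : c.keys.Nodup := hkeys ▸ hnd
    have hmemC : (item.1, pyMinBySnd cs) ∈ c.items := by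
      rw [hit]
      exact List.mem_map.mpr ⟨(item.1, cs), hmemT, rfl⟩
    have hget : c.get? item.1 = some (pyMinBySnd cs) :=
      (PySem.Dict.get?_eq_some_iff_mem_items c _ _ hndC).mpr hmemC
    have hc : c.contains item.1 = true := by rw [hcont]; exact ht
    have hmin := pyMinBySnd_append cs item.2 hcsne
    have hkeys' : (stepB t item).keys = t.keys := by
      rw [hmod]; exact PySem.Dict.keys_insert_of_contains t _ ht
    have hitems' : (stepB t item).items
        = t.items.map (fun p => if (p.1 == item.1) = true then (item.1, cs ++ [item.2]) else p) := by
      rw [hmod, hgetD]; exact PySem.Dict.items_insert_of_contains t _ ht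
    refine ⟨hkeys' ▸ hnd, ?_, ?_⟩
    · intro p hp
      rw [hitems'] at hp
      rcases List.mem_map.mp hp with ⟨q, hq, rfl⟩
      by_cases hq1 : (q.1 == item.1) = true
      · simp [hq1]
      · simpa [hq1] using hne q hq
    · by_cases hlt : (pyMinBySnd cs).2 > item.2.2
      · have hAstep : stepA c item = c.insert item.1 item.2 := by
          simp [stepA, hc, hget, hlt]
        rw [hAstep, PySem.Dict.items_insert_of_contains c _ hc, hitems', hit,
          List.map_map, List.map_map]
        refine List.map_congr_left ?_
        intro p hp
        by_cases hp1 : (p.1 == item.1) = true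
        · simp only [Function.comp, hp1, if_pos]
          simp only [hmin, if_pos (by omega : item.2.2 < (pyMinBySnd cs).2)]
        · simp [Function.comp, hp1]
      · have hAstep : stepA c item = c := by
          simp [stepA, hc, hget, hlt]
        rw [hAstep, hitems', hit, List.map_map]
        refine List.map_congr_left ?_
        intro p hp
        by_cases hp1 : (p.1 == item.1) = true
        · have hp1' : p.1 = item.1 := by simpa using hp1
          have hp' : (item.1, p.2) ∈ t.items := by rw [← hp1', Prod.mk.eta]; exact hp
          have h2 : p.2 = cs := by
            have := PySem.Dict.getD_of_mem_items t hp' hnd []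
            rw [hgetD] at this
            exact this.symm
          simp only [Function.comp, hp1', h2]
          simp [hmin, if_neg (by omega : ¬ item.2.2 < (pyMinBySnd cs).2)]
        · simp [Function.comp, hp1]

theorem inv_fold (l : List (String × Int × Int))
    (c : PySem.Dict String (Int × Int)) (t : PySem.Dict String (List (Int × Int)))
    (h : pvInv c t) : pvInv (l.foldl stepA c) (l.foldl stepB t) := by
  induction l generalizing c t with
  | nil => exact h
  | cons x xs ih => exact ih _ _ (inv_step c t h x)

theorem inv_fold2 (chunks : List (List (String × Int × Int)))
    (c : PySem.Dict String (Int × Int)) (t : PySem.Dict String (List (Int × Int)))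
    (h : pvInv c t) :
    pvInv (chunks.foldl (fun c ch => ch.foldl stepA c) c)
      (chunks.foldl (fun t ch => ch.foldl stepB t) t) := by
  induction chunks generalizing c t with
  | nil => exact h
  | cons x xs ih => exact ih _ _ (inv_fold x c t h)

-- ===== VERDICT (by name: the statement is the Claim_ definition above) =====
theorem rep_agg_py_spec : Claim_equal_rep_agg_py := by
  intro chunks _
  show rep_agg_py chunks = rep_agg_py_alt chunks
  have hbase : pvInv PySem.Dict.empty PySem.Dict.empty := by
    refine ⟨?_, ?_, ?_⟩ <;> simp [PySem.Dict.empty, PySem.Dict.keys]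
  have h := inv_fold2 chunks PySem.Dict.empty PySem.Dict.empty hbase
  exact h.2.2
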